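-- pv_equiv track=rewrite | github.com/ethanle792-design/SATSolverLegit | utils.py | get_minimal_assignments
-- ===== SOURCE A (Python) =====
-- def get_minimal_assignments(solutions):
--     """
--     Analyzes SAT solutions to find common essential variables.
--     Works with either a single dictionary or a list of dictionaries.
--     """
--     # 1. Handle Empty Input
--     if not solutions:
--         return {}, []
--
--     # 2. Handle Single Solution Input
--     # If the input is a dict (one solution), wrap it in a list
--     if isinstance(solutions, dict):
--         solutions = [solutions]
--
--     # 3. Minimization Logic
--     all_vars = solutions[0].keys()
--     minimal_set = {}
--
--     for var in all_vars:
--         # Get every value assigned to this variable across all solutions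
--         distinct_values = {sol[var] for sol in solutions}
--
--         # If the variable has the same value in every solution, it's essential
--         if len(distinct_values) == 1:
--             minimal_set[var] = list(distinct_values)[0]
--
--     return minimal_set, solutions
-- ===== SOURCE B (Python) =====
-- def get_minimal_assignments(solutions):
--     # 1. Handle Empty Input
--     if not solutions:
--         return {}, []
--
--     # 2. Handle Single Solution Input
--     if isinstance(solutions, dict):
--         solutions = [solutions]
--
--     # 3. Single accumulating pass over the remaining solutions:
--     # start with every variable of the first solution alive, and kill a
--     # variable as soon as some solution disagrees with the first one.
--     candidates = dict(solutions[0])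
--     alive = set(candidates)
--     for sol in solutions[1:]:
--         for var in candidates:
--             if sol[var] != candidates[var]:
--                 alive.discard(var)
--
--     minimal_set = {var: candidates[var] for var in candidates if var in alive}
--     return minimal_set, solutions
-- ===== Notes on version B (the rewrite author's own statement) =====
-- stated objective: alternative
-- what changed: Replaces the per-variable construction of a set of values across all solutions by a single accumulating pass over the remaining solutions that discards from an alive-set every variable disagreeing with the first solution, then filters the first solution.
import Mathlib
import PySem

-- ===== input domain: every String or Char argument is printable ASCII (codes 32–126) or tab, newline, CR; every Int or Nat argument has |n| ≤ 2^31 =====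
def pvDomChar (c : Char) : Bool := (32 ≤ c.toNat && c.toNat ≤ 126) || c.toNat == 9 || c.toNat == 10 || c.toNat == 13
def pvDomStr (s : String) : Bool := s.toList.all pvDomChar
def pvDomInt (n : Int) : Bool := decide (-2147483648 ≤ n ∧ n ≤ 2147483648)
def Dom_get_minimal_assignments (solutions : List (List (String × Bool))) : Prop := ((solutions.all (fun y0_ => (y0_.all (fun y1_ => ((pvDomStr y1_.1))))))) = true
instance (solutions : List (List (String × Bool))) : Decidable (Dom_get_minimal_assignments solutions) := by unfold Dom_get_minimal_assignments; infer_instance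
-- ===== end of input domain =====

-- B replaces the per-variable value-set construction by one accumulating pass over the
-- remaining solutions that discards disagreeing variables from an alive-set (objective: alternative).
-- Each Python dict argument arrives as an assoc list; PySem.Dict.ofList rebuilds the dict
-- (duplicate keys: last value wins, first position kept), exactly Python's dict(pairs).

-- ===== PORT A =====
def get_minimal_assignments (solutions : List (List (String × Bool))) : (List (String × Bool)) × (List (List (String × Bool))) :=
  match solutions with
  | [] => ([], [])                                    -- if not solutions: return {}, []
  | s0 :: rest =>
      let dicts : List (PySem.Dict String Bool) := PySem.Dict.ofList s0 :: rest.map PySem.Dict.ofList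
      let all_vars := (PySem.Dict.ofList s0).keys     -- solutions[0].keys()
      let minimal := all_vars.foldl
        (fun (m : PySem.Dict String Bool) v =>
          -- distinct_values = {sol[var] for sol in solutions}; sol[var] is exact here:
          -- Pre_ guarantees the key is present, so getD's default is never used
          let distinct : PySem.Set Bool := PySem.Set.ofList (dicts.map (fun sol => sol.getD v false))
          -- list(distinct_values)[0]: a singleton set, so Python's set order cannot matter
          if distinct.length = 1 then m.insert v (distinct.headD false) else m)
        PySem.Dict.empty
      (minimal.items, dicts.map PySem.Dict.items)

-- ===== PORT B =====
def get_minimal_assignments_alt (solutions : List (List (String × Bool))) : (List (String × Bool)) × (List (List (String × Bool))) :=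
  match solutions with
  | [] => ([], [])
  | s0 :: rest =>
      let candidates := PySem.Dict.ofList s0          -- candidates = dict(solutions[0])
      let drest := rest.map PySem.Dict.ofList
      let alive := drest.foldl                        -- for sol in solutions[1:]: for var in candidates: …
        (fun (al : PySem.Set String) sol =>
          candidates.keys.foldl
            (fun (al : PySem.Set String) v =>
              -- sol[var] is exact here: Pre_ guarantees the key is present
              if sol.getD v false ≠ candidates.getD v false then PySem.Set.discard al v else al)
            al)
        (PySem.Set.ofList candidates.keys)            -- alive = set(candidates)
      let minimal := candidates.items.filter (fun p => PySem.Set.contains alive p.1)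
      (minimal, candidates.items :: drest.map PySem.Dict.items)

-- ===== PRECONDITION & SPEC =====
-- Pre_ excludes exactly the inputs on which Python A raises KeyError: some variable of the
-- first solution is missing from a later solution.
def Pre_get_minimal_assignments (solutions : List (List (String × Bool))) : Prop :=
  ∀ s0 ∈ solutions.take 1, ∀ p ∈ s0, ∀ sol ∈ solutions, p.1 ∈ sol.map Prod.fst
instance (solutions : List (List (String × Bool))) : Decidable (Pre_get_minimal_assignments solutions) := by unfold Pre_get_minimal_assignments; infer_instance

def pvWitness_get_minimal_assignments : (List (List (String × Bool))) :=
  [[("a", true), ("b", false)], [("a", true), ("b", true)]]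

def Spec_get_minimal_assignments (solutions : List (List (String × Bool))) (out : (List (String × Bool)) × (List (List (String × Bool)))) : Prop := out = get_minimal_assignments_alt solutions
instance (solutions : List (List (String × Bool))) (out : (List (String × Bool)) × (List (List (String × Bool)))) : Decidable (Spec_get_minimal_assignments solutions out) := by unfold Spec_get_minimal_assignments; infer_instance

-- ===== CLAIM (what is proved, stated in full; the proofs are below) =====
def Claim_equal_get_minimal_assignments : Prop := ∀ (solutions : List (List (String × Bool))), Dom_get_minimal_assignments solutions → Pre_get_minimal_assignments solutions → Spec_get_minimal_assignments solutions (get_minimal_assignments solutions)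

-- ===== LEMMAS AND PROOFS =====

-- A's test 'len(distinct_values) == 1' means: all later values equal the first one
lemma set_cons_length_one_iff (x : Bool) (l : List Bool) :
    (PySem.Set.ofList (x :: l)).length = 1 ↔ ∀ y ∈ l, y = x := by
  rw [PySem.Set.ofList_cons]
  simp only [List.length_cons]
  rw [show ((PySem.Set.ofList l).discard x).length + 1 = 1 ↔ ((PySem.Set.ofList l).discard x).length = 0 by omega]
  rw [List.length_eq_zero_iff, List.eq_nil_iff_forall_not_mem]
  constructor
  · intro h y hy
    by_contra hne
    exact h y ((PySem.Set.mem_discard _ _ _).mpr ⟨(PySem.Set.mem_ofList _ _).mpr hy, hne⟩)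
  · intro h y hy
    rcases (PySem.Set.mem_discard _ _ _).mp hy with ⟨hmem, hne⟩
    exact hne (h y ((PySem.Set.mem_ofList _ _).mp hmem))

-- 'list(distinct_values)[0]' for a set built from a nonempty list is its first element
lemma set_cons_headD (x : Bool) (l : List Bool) :
    (PySem.Set.ofList (x :: l)).headD false = x := by
  rw [PySem.Set.ofList_cons]; rfl

-- A's conditional-insert loop over distinct fresh keys builds exactly the filtered item list
lemma foldl_insert_cond_items (ks : List String) (C : String → Bool) (val : String → Bool)
    (m : PySem.Dict String Bool) (hfresh : ∀ v ∈ ks, m.contains v = false) (hnd : ks.Nodup) :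
    (ks.foldl (fun m v => if C v then m.insert v (val v) else m) m).items
      = m.items ++ (ks.filter C).map (fun v => (v, val v)) := by
  induction ks generalizing m with
  | nil => simp
  | cons v ks ih =>
    simp only [List.foldl_cons, List.filter_cons]
    rcases List.nodup_cons.mp hnd with ⟨hv, hnd'⟩
    by_cases hc : C v
    · simp only [hc, if_pos]
      rw [ih (m := m.insert v (val v))
            (fun w hw => by
              rw [PySem.Dict.contains_insert]
              have hbe : (w == v) = false := by
                simp only [beq_eq_false_iff_ne]; rintro rfl; exact hv hw
              simp [hbe, hfresh w (List.mem_cons_of_mem _ hw)]) hnd']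
      rw [PySem.Dict.items_insert_of_not_contains m (val v) (hfresh v List.mem_cons_self)]
      simp [hc]
    · rw [if_neg hc, if_neg hc,
          ih (m := m) (fun w hw => hfresh w (List.mem_cons_of_mem _ hw)) hnd']

-- membership after B's inner discard loop (one solution)
lemma mem_inner_fold (cand sol : PySem.Dict String Bool) (ks : List String)
    (al : PySem.Set String) (v : String) :
    v ∈ ks.foldl (fun (al : PySem.Set String) w =>
          if sol.getD w false ≠ cand.getD w false then PySem.Set.discard al w else al) al
      ↔ v ∈ al ∧ (v ∈ ks → sol.getD v false = cand.getD v false) := by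
  induction ks generalizing al with
  | nil => simp
  | cons w ks ih =>
    simp only [List.foldl_cons, ih, List.mem_cons]
    by_cases hw : sol.getD w false ≠ cand.getD w false
    · rw [if_pos hw]
      simp only [PySem.Set.mem_discard]
      constructor
      · rintro ⟨⟨hal, hne⟩, h⟩
        refine ⟨hal, fun hm => ?_⟩
        rcases hm with rfl | hm
        · exact absurd rfl hne
        · exact h hm
      · rintro ⟨hal, h⟩
        have hne : v ≠ w := by rintro rfl; exact hw (h (Or.inl rfl))
        exact ⟨⟨hal, hne⟩, fun hm => h (Or.inr hm)⟩
    · rw [if_neg hw]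
      rw [not_ne_iff] at hw
      constructor
      · rintro ⟨hal, h⟩
        refine ⟨hal, fun hm => ?_⟩
        rcases hm with rfl | hm
        · exact hw
        · exact h hm
      · rintro ⟨hal, h⟩
        exact ⟨hal, fun hm => h (Or.inr hm)⟩

-- membership after B's whole alive loop
lemma mem_outer_fold (cand : PySem.Dict String Bool) (rest : List (PySem.Dict String Bool))
    (ks : List String) (al : PySem.Set String) (v : String) :
    v ∈ rest.foldl (fun (al : PySem.Set String) sol =>
          ks.foldl (fun (al : PySem.Set String) w =>
            if sol.getD w false ≠ cand.getD w false then PySem.Set.discard al w else al) al) al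
      ↔ v ∈ al ∧ (v ∈ ks → ∀ sol ∈ rest, sol.getD v false = cand.getD v false) := by
  induction rest generalizing al with
  | nil => simp
  | cons d rest ih =>
    simp only [List.foldl_cons, ih, mem_inner_fold, List.mem_cons]
    constructor
    · rintro ⟨⟨hal, hd⟩, h⟩
      refine ⟨hal, fun hm sol hsol => ?_⟩
      rcases hsol with rfl | hsol
      · exact hd hm
      · exact h hm sol hsol
    · rintro ⟨hal, h⟩
      exact ⟨⟨hal, fun hm => h hm _ (Or.inl rfl)⟩, fun hm sol hsol => h hm sol (Or.inr hsol)⟩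

-- the two ports agree on EVERY input (Pre_ only marks where the Pythons raise KeyError)
lemma ports_agree (solutions : List (List (String × Bool))) :
    get_minimal_assignments solutions = get_minimal_assignments_alt solutions := by
  match solutions with
  | [] => rfl
  | s0 :: rest =>
    simp only [get_minimal_assignments, get_minimal_assignments_alt, List.map_cons]
    set cand := PySem.Dict.ofList s0 with hcand
    set drest := rest.map PySem.Dict.ofList (α := List (String × Bool)) with hdrest
    refine Prod.ext ?_ rfl
    simp only
    have hnd : cand.keys.Nodup := PySem.Dict.nodup_keys_ofList s0
    have hstep : (fun (m : PySem.Dict String Bool) v =>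
        if (PySem.Set.ofList (cand.getD v false :: drest.map (fun sol => sol.getD v false))).length = 1
        then m.insert v ((PySem.Set.ofList (cand.getD v false :: drest.map (fun sol => sol.getD v false))).headD false)
        else m)
      = (fun (m : PySem.Dict String Bool) v =>
        if (decide (∀ sol ∈ drest, sol.getD v false = cand.getD v false) : Bool) = true
        then m.insert v (cand.getD v false) else m) := by
      funext m v
      by_cases hc : ∀ sol ∈ drest, sol.getD v false = cand.getD v false
      · rw [if_pos (by
            rw [set_cons_length_one_iff]
            intro y hy
            rcases List.mem_map.mp hy with ⟨sol, hsol, rfl⟩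
            exact hc sol hsol)]
        rw [set_cons_headD, if_pos (by simpa using hc)]
      · rw [if_neg (fun hlen => hc (by
            intro sol hsol
            exact (set_cons_length_one_iff _ _).mp hlen _ (List.mem_map_of_mem hsol)))]
        rw [if_neg (by simpa using hc)]
    rw [hstep]
    rw [foldl_insert_cond_items cand.keys _ _ PySem.Dict.empty
          (fun v _ => PySem.Dict.contains_empty v) hnd]
    rw [PySem.Dict.items_eq_map_keys cand hnd false, List.filter_map]
    rw [show (PySem.Dict.empty : PySem.Dict String Bool).items = [] from rfl, List.nil_append]
    simp only [Function.comp_def]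
    congr 1
    apply List.filter_congr
    intro k hk
    have halive : (PySem.Set.contains (drest.foldl (fun (al : PySem.Set String) sol =>
          cand.keys.foldl (fun (al : PySem.Set String) w =>
            if sol.getD w false ≠ cand.getD w false then PySem.Set.discard al w else al) al)
          (PySem.Set.ofList cand.keys)) k) = true
        ↔ ∀ sol ∈ drest, sol.getD k false = cand.getD k false := by
      rw [PySem.Set.contains_iff, mem_outer_fold]
      simp [PySem.Set.mem_ofList, hk]
    rw [Bool.eq_iff_iff]
    simp only [decide_eq_true_eq]
    exact halive.symm

-- ===== VERDICT (by name: the statement is the Claim_ definition above) =====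
theorem get_minimal_assignments_spec : Claim_equal_get_minimal_assignments := by
  intro solutions _ _
  unfold Spec_get_minimal_assignments
  exact ports_agree solutions
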